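-- pv_equiv track=rewrite | github.com/marsiekiera/YHB | flask/app/helpers.py | only_digit
-- ===== SOURCE A (Python) =====
-- def only_digit(input_string):
--     dots = 0
--     for letter in input_string:
--         if letter in (".", ","):
--             dots += 1
--         elif not letter.isdigit():
--             return False
--     if dots > 1:
--         return False
--     else:
--         return True
-- ===== SOURCE B (Python) =====
-- def only_digit(input_string):
--     # Locate the first separator; if none, the whole string must be digits.
--     # Otherwise split there: both sides must be pure digits (a second
--     # separator in the tail fails the digit check by itself).
--     i = next((j for j, c in enumerate(input_string) if c in ('.', ',')), None)
--     if i is None: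
--         return all(c.isdigit() for c in input_string)
--     return all(c.isdigit() for c in input_string[:i]) and all(c.isdigit() for c in input_string[i + 1:])
-- ===== Notes on version B (the rewrite author's own statement) =====
-- stated objective: alternative
-- what changed: Instead of scanning with a separator counter and early return, B locates the first '.'/',' occurrence, splits the string there and checks that both sides are pure digits (no separator count anywhere: a second separator fails the tail digit check by itself); no separator means a plain all-digits check.
import Mathlib
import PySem

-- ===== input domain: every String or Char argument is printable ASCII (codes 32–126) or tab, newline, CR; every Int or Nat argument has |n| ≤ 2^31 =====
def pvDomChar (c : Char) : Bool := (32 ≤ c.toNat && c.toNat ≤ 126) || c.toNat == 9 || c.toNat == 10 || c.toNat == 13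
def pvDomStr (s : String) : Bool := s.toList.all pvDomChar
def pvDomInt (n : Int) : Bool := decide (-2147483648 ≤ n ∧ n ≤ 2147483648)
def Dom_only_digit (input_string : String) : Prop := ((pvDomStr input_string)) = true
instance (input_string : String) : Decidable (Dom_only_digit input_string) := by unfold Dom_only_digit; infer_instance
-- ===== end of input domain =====

-- B drops A's separator counter entirely: it splits the string at the first '.'/',' and
-- requires both sides to be pure digits; alternative decomposition, same cost.

-- ===== PORT A =====
-- the for-loop with early return and the 'dots' accumulator, then the final dots > 1 test
def only_digit_go (cs : List Char) (dots : Nat) : Bool :=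
  match cs with
  | [] => if dots > 1 then false else true
  | letter :: rest =>
      if letter == '.' || letter == ',' then only_digit_go rest (dots + 1)
      else if !(PySem.Chars.isdigit letter) then false
      else only_digit_go rest dots

def only_digit (input_string : String) : Bool :=
  only_digit_go input_string.toList 0

-- ===== PORT B =====
-- Source B: i = first index of a separator (none if absent); then either a plain all-digits
-- check, or all-digits on s[:i] and on s[i+1:].
def only_digit_alt (input_string : String) : Bool :=
  let cs := input_string.toList
  match cs.findIdx? (fun c => c == '.' || c == ',') with
  | none => cs.all (fun c => PySem.Chars.isdigit c)
  | some i =>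
      (cs.take i).all (fun c => PySem.Chars.isdigit c) &&
      (cs.drop (i + 1)).all (fun c => PySem.Chars.isdigit c)

-- ===== PRECONDITION & SPEC =====
def Spec_only_digit (input_string : String) (out : Bool) : Prop := out = only_digit_alt input_string
instance (input_string : String) (out : Bool) : Decidable (Spec_only_digit input_string out) := by unfold Spec_only_digit; infer_instance

-- ===== CLAIM (what is proved, stated in full; the proofs are below) =====
def Claim_equal_only_digit : Prop := ∀ (input_string : String), Dom_only_digit input_string → Spec_only_digit input_string (only_digit input_string)

-- ===== LEMMAS AND PROOFS =====
-- the list-level body of B, to recurse on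
def alt_go (cs : List Char) : Bool :=
  match cs.findIdx? (fun c => c == '.' || c == ',') with
  | none => cs.all (fun c => PySem.Chars.isdigit c)
  | some i =>
      (cs.take i).all (fun c => PySem.Chars.isdigit c) &&
      (cs.drop (i + 1)).all (fun c => PySem.Chars.isdigit c)

theorem sep_not_digit (c : Char) (h : (c == '.' || c == ',') = true) :
    PySem.Chars.isdigit c = false := by
  rcases Bool.or_eq_true_iff.mp h with h' | h' <;>
    simp only [beq_iff_eq] at h' <;> subst h' <;> decide

-- with two or more separators already seen, A rejects
theorem go_ge2_false (cs : List Char) : ∀ k : Nat, only_digit_go cs (k + 2) = false := by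
  induction cs with
  | nil => intro k; simp [only_digit_go]
  | cons c rest ih =>
      intro k
      by_cases hs : (c == '.' || c == ',') = true
      · simpa [only_digit_go, hs] using ih (k + 1)
      · simp [only_digit_go, hs]
        intro _; exact ih k

-- after one separator has been consumed, A accepts iff the rest is pure digits
theorem go_one_eq_all (cs : List Char) :
    only_digit_go cs 1 = cs.all (fun c => PySem.Chars.isdigit c) := by
  induction cs with
  | nil => simp [only_digit_go]
  | cons c rest ih =>
      by_cases hs : (c == '.' || c == ',') = true
      · simp [only_digit_go, hs, go_ge2_false rest 0, sep_not_digit c hs]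
      · simp [only_digit_go, hs, ih, List.all_cons]

theorem go_zero_eq_alt (cs : List Char) : only_digit_go cs 0 = alt_go cs := by
  induction cs with
  | nil => simp [only_digit_go, alt_go]
  | cons c rest ih =>
      by_cases hs : (c == '.' || c == ',') = true
      · simp [only_digit_go, alt_go, List.findIdx?_cons, hs, go_one_eq_all]
      · rw [alt_go] at ih
        cases hfd : rest.findIdx? (fun c => c == '.' || c == ',') with
        | none =>
            simp only [hfd] at ih
            cases hd : PySem.Chars.isdigit c <;>
              simp [only_digit_go, alt_go, List.findIdx?_cons, hs, hd, hfd, ih, List.all_cons]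
        | some i =>
            simp only [hfd] at ih
            cases hd : PySem.Chars.isdigit c <;>
              simp [only_digit_go, alt_go, List.findIdx?_cons, hs, hd, hfd, ih,
                List.drop_succ_cons, List.all_cons]

-- ===== VERDICT (by name: the statement is the Claim_ definition above) =====
theorem only_digit_spec : Claim_equal_only_digit := by
  intro s _
  unfold Spec_only_digit only_digit only_digit_alt
  simpa [alt_go] using go_zero_eq_alt s.toList
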